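-- pv_equiv track=rewrite | github.com/snu-micc/uspto-revisit | reaction_smiles_processing_utils.py | replace_with_smiles
-- ===== SOURCE A (Python) =====
-- def replace_with_smiles(rxn_code, smiles_dict):
--     # Split the fixed reaction code into parts separated by '>'
--     parts = rxn_code.split('>')
--     # Replace each code in the parts with the corresponding SMILES string
--     replaced_parts = []
--     for part in parts:
--         codes = part.split('.')
--         replaced_codes = [smiles_dict.get(code, code) for code in codes]
--         replaced_parts.append('.'.join(replaced_codes))
--     replaced_rxn_code = '>'.join(replaced_parts)
--     return replaced_rxn_code
-- ===== SOURCE B (Python) =====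
-- def replace_with_smiles(rxn_code, smiles_dict):
--     # Single left-to-right character scan: accumulate a code token, flush it
--     # (mapped through the dict) whenever a delimiter '.' or '>' appears.
--     out = []
--     tok = []
--     for ch in rxn_code:
--         if ch == '.' or ch == '>':
--             code = ''.join(tok)
--             out.append(smiles_dict.get(code, code))
--             out.append(ch)
--             tok = []
--         else:
--             tok.append(ch)
--     code = ''.join(tok)
--     out.append(smiles_dict.get(code, code))
--     return ''.join(out)
-- ===== Notes on version B (the rewrite author's own statement) =====
-- stated objective: alternative
-- what changed: Replaces the nested split('>')/split('.')/join reconstruction with a single left-to-right character scan that flushes each accumulated code token through the dict at every delimiter.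
import Mathlib
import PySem

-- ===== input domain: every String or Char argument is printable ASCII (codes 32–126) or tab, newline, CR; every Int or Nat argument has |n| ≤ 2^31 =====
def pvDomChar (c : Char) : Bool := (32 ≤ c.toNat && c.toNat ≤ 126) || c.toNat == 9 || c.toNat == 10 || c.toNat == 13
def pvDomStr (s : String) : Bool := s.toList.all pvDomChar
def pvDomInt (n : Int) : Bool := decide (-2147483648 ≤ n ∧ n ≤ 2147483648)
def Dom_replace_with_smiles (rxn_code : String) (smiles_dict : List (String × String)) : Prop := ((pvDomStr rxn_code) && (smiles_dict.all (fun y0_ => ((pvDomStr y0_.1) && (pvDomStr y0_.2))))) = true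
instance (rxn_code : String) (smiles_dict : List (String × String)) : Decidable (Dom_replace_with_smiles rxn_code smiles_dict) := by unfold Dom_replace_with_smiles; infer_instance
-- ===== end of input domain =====

-- B replaces A's nested split('>')/split('.')/join reconstruction by one left-to-right
-- character scan flushing each code token through the dict at every delimiter (alternative decomposition).

-- shared lookup helper: Python's smiles_dict.get(code, code)
def pvLookupD (smiles_dict : List (String × String)) (code : String) : String :=
  (PySem.Dict.mk smiles_dict).getD code code

-- Python's s.split(sep) for a non-empty sep (the only way A calls it)
def pvSplit (s : String) (sep : String) : List String :=
  (PySem.Chars.splitOn s.toList sep.toList).map String.ofList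

-- ===== PORT A =====
def replace_with_smiles (rxn_code : String) (smiles_dict : List (String × String)) : String :=
  let parts := pvSplit rxn_code ">"
  let replaced_parts := parts.foldl (fun acc part =>
    let codes := pvSplit part "."
    let replaced_codes := codes.map (fun code => pvLookupD smiles_dict code)
    acc ++ [PySem.Str.join "." replaced_codes]) ([] : List String)
  PySem.Str.join ">" replaced_parts

-- ===== PORT B =====
def replace_with_smiles_alt (rxn_code : String) (smiles_dict : List (String × String)) : String :=
  let step : List String × List Char → Char → List String × List Char := fun st ch =>
    if ch = '.' || ch = '>' then
      (st.1 ++ [pvLookupD smiles_dict (String.ofList st.2), String.ofList [ch]], [])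
    else (st.1, st.2 ++ [ch])
  let fin := rxn_code.toList.foldl step ([], [])
  PySem.Str.join "" (fin.1 ++ [pvLookupD smiles_dict (String.ofList fin.2)])

-- ===== PRECONDITION & SPEC =====
def Spec_replace_with_smiles (rxn_code : String) (smiles_dict : List (String × String)) (out : String) : Prop := out = replace_with_smiles_alt rxn_code smiles_dict
instance (rxn_code : String) (smiles_dict : List (String × String)) (out : String) : Decidable (Spec_replace_with_smiles rxn_code smiles_dict out) := by unfold Spec_replace_with_smiles; infer_instance

-- ===== CLAIM (what is proved, stated in full; the proofs are below) =====
def Claim_equal_replace_with_smiles : Prop := ∀ (rxn_code : String) (smiles_dict : List (String × String)), Dom_replace_with_smiles rxn_code smiles_dict → Spec_replace_with_smiles rxn_code smiles_dict (replace_with_smiles rxn_code smiles_dict)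

-- ===== LEMMAS AND PROOFS =====

-- simple single-character splitter, the reference for PySem.Chars.splitOn [c]
def pvSp (c : Char) : List Char → List (List Char)
  | [] => [[]]
  | a :: l => if a = c then [] :: pvSp c l else (pvSp c l).modifyHead (a :: ·)

theorem pvSp_ne_nil (c : Char) (l : List Char) : pvSp c l ≠ [] := by
  induction l with
  | nil => simp [pvSp]
  | cons a l ih =>
    simp only [pvSp]
    split
    · simp
    · cases h : pvSp c l with
      | nil => exact absurd h ih
      | cons p ps => simp [List.modifyHead]

theorem pvGo_eq (c : Char) : ∀ (fuel : Nat) (l cur : List Char) (acc : List (List Char)),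
    l.length ≤ fuel →
    PySem.Chars.splitOn.go [c] fuel l cur acc
      = acc.reverse ++ (pvSp c l).modifyHead (cur.reverse ++ ·) := by
  intro fuel
  induction fuel with
  | zero =>
    intro l cur acc h
    interval_cases hl : l.length
    rw [List.length_eq_zero_iff] at hl; subst hl
    simp [PySem.Chars.splitOn.go, pvSp, List.modifyHead]
  | succ fuel ih =>
    intro l cur acc h
    cases l with
    | nil => simp [PySem.Chars.splitOn.go, pvSp, List.modifyHead]
    | cons a rest =>
      simp only [PySem.Chars.splitOn.go]
      by_cases hc : a = c
      · subst hc
        have hpre : List.isPrefixOf [a] (a :: rest) = true := by simp [List.isPrefixOf]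
        simp only [hpre, if_true]
        rw [show List.drop [a].length (a :: rest) = rest by simp]
        rw [ih rest [] (cur.reverse :: acc) (by simpa using Nat.le_of_succ_le_succ h)]
        simp only [pvSp, List.reverse_cons, List.reverse_nil, List.nil_append,
          List.append_assoc, List.modifyHead, List.singleton_append]
        cases pvSp a rest <;> simp
      · have hpre : List.isPrefixOf [c] (a :: rest) = false := by
          simp [List.isPrefixOf]; exact fun hh => absurd hh.symm hc
        simp only [hpre, Bool.false_eq_true, if_false]
        rw [ih rest (a :: cur) acc (by simpa using Nat.le_of_succ_le_succ h)]
        simp only [pvSp, hc, if_false]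
        cases hsp : pvSp c rest with
        | nil => exact absurd hsp (pvSp_ne_nil c rest)
        | cons p ps => simp [List.modifyHead]

theorem splitOn_eq_pvSp (c : Char) (l : List Char) :
    PySem.Chars.splitOn l [c] = pvSp c l := by
  unfold PySem.Chars.splitOn
  rw [pvGo_eq c (l.length + 1) l [] [] (by omega)]
  cases hsp : pvSp c l with
  | nil => exact absurd hsp (pvSp_ne_nil c l)
  | cons p ps => simp [List.modifyHead]

theorem pvSp_append (c : Char) (tok l : List Char) (h : c ∉ tok) :
    pvSp c (tok ++ l) = (pvSp c l).modifyHead (tok ++ ·) := by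
  induction tok with
  | nil =>
    cases hsp : pvSp c l with
    | nil => exact absurd hsp (pvSp_ne_nil c l)
    | cons p ps => simp [hsp, List.modifyHead]
  | cons a tok ih =>
    have ha : a ≠ c := fun hh => h (hh ▸ List.mem_cons_self)
    have h' : c ∉ tok := fun hh => h (List.mem_cons_of_mem a hh)
    simp only [List.cons_append, pvSp, ha, if_false, ih h']
    cases hsp : pvSp c l with
    | nil => exact absurd hsp (pvSp_ne_nil c l)
    | cons p ps => simp [List.modifyHead]

theorem pvSp_no_delim (c : Char) (p : List Char) (h : c ∉ p) : pvSp c p = [p] := by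
  have := pvSp_append c p [] h
  simpa [pvSp, List.modifyHead] using this

-- join over a head with a prefix glued on
theorem pvJoin_cons_append (sep pre a : List Char) (rest : List (List Char)) :
    PySem.Chars.join sep ((pre ++ a) :: rest) = pre ++ PySem.Chars.join sep (a :: rest) := by
  cases rest with
  | nil => simp [PySem.Chars.join, List.intercalate]
  | cons b t => simp [PySem.Chars.join, List.intercalate, List.append_assoc]

theorem pvJoin_cons_cons' (sep a b : List Char) (t : List (List Char)) :
    PySem.Chars.join sep (a :: b :: t) = a ++ sep ++ PySem.Chars.join sep (b :: t) := by
  simp [PySem.Chars.join, List.intercalate, List.append_assoc]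

-- the token value after lookup, as a char list
def pvF (d : List (String × String)) (tok : List Char) : List Char :=
  (pvLookupD d (String.ofList tok)).toList

-- scan specification with explicit token accumulator
def pvH (d : List (String × String)) (tok : List Char) : List Char → List Char
  | [] => pvF d tok
  | c :: l => if c = '.' ∨ c = '>' then pvF d tok ++ [c] ++ pvH d [] l else pvH d (tok ++ [c]) l

-- A's result, at the char-list level
def pvA (d : List (String × String)) (l : List Char) : List Char :=
  PySem.Chars.join ['>'] ((pvSp '>' l).map (fun p =>
    PySem.Chars.join ['.'] ((pvSp '.' p).map (fun q => pvF d q))))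

theorem pvA_eq_pvH (d : List (String × String)) (l : List Char) :
    ∀ tok, '.' ∉ tok → '>' ∉ tok → pvA d (tok ++ l) = pvH d tok l := by
  induction l with
  | nil =>
    intro tok h1 h2
    simp only [List.append_nil, pvA, pvH]
    rw [pvSp_no_delim '>' tok h2]
    simp only [List.map_cons, List.map_nil]
    rw [pvSp_no_delim '.' tok h1]
    simp [PySem.Chars.join, List.intercalate]
  | cons c l ih =>
    intro tok h1 h2
    by_cases hgt : c = '>'
    · subst hgt
      simp only [pvH]
      simp only [or_true, if_true]
      rw [← ih [] (by simp) (by simp)]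
      simp only [List.nil_append, pvA]
      rw [pvSp_append '>' tok ('>' :: l) h2]
      have hsp' : pvSp '>' ('>' :: l) = [] :: pvSp '>' l := by simp [pvSp]
      rw [hsp']
      cases hsp : pvSp '>' l with
      | nil => exact absurd hsp (pvSp_ne_nil '>' l)
      | cons p ps =>
        simp only [List.modifyHead, List.append_nil, List.map_cons]
        rw [pvSp_no_delim '.' tok h1]
        simp only [List.map_cons, List.map_nil]
        rw [pvJoin_cons_cons']
        simp [PySem.Chars.join, List.intercalate, List.append_assoc, pvF]
    · by_cases hdot : c = '.'
      · subst hdot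
        simp only [pvH]
        simp only [true_or, if_true]
        rw [← ih [] (by simp) (by simp)]
        simp only [List.nil_append, pvA]
        rw [pvSp_append '>' tok ('.' :: l) h2]
        have hsp' : pvSp '>' ('.' :: l) = (pvSp '>' l).modifyHead ('.' :: ·) := by
          simp [pvSp]
        rw [hsp']
        cases hsp : pvSp '>' l with
        | nil => exact absurd hsp (pvSp_ne_nil '>' l)
        | cons p ps =>
          simp only [List.modifyHead, List.map_cons]
          have hin : PySem.Chars.join ['.'] ((pvSp '.' (tok ++ '.' :: p)).map (fun q => pvF d q))
              = (pvF d tok ++ ['.']) ++ PySem.Chars.join ['.'] ((pvSp '.' p).map (fun q => pvF d q)) := by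
            rw [pvSp_append '.' tok ('.' :: p) h1]
            have hsp2' : pvSp '.' ('.' :: p) = [] :: pvSp '.' p := by simp [pvSp]
            rw [hsp2']
            cases hsp2 : pvSp '.' p with
            | nil => exact absurd hsp2 (pvSp_ne_nil '.' p)
            | cons q qs =>
              simp only [List.modifyHead, List.append_nil, List.map_cons]
              rw [pvJoin_cons_cons']
          rw [hin, pvJoin_cons_append]
      · have hcond : ¬ (c = '.' ∨ c = '>') := by tauto
        simp only [pvH]
        rw [if_neg hcond]
        rw [← ih (tok ++ [c]) (by simp [h1]; exact fun hh => hdot hh.symm)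
          (by simp [h2]; exact fun hh => hgt hh.symm)]
        simp [List.append_assoc]

-- A's port computes pvA
theorem portA_toList (s : String) (d : List (String × String)) :
    (replace_with_smiles s d).toList = pvA d s.toList := by
  simp only [replace_with_smiles, PySem.Str.toList_join, pvA]
  rw [PySem.List.foldl_append_singleton_eq_map]
  rw [show (">".toList) = ['>'] from rfl]
  congr 1
  rw [pvSplit, show (">".toList) = ['>'] from rfl, splitOn_eq_pvSp, List.nil_append, List.map_map, List.map_map]
  apply List.map_congr_left
  intro p hp
  simp only [Function.comp_apply, PySem.Str.toList_join, pvSplit, List.map_map]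
  rw [show (".".toList) = ['.'] from rfl, String.toList_ofList, splitOn_eq_pvSp]
  simp [Function.comp_def, pvF]

-- B's loop body, named for the proofs (definitionally the lambda in the port)
def pvStep (d : List (String × String)) : List String × List Char → Char → List String × List Char :=
  fun st ch =>
    if ch = '.' || ch = '>' then
      (st.1 ++ [pvLookupD d (String.ofList st.2), String.ofList [ch]], [])
    else (st.1, st.2 ++ [ch])

theorem pvJoin_empty (parts : List (List Char)) : PySem.Chars.join [] parts = parts.flatten := by
  induction parts with
  | nil => simp [PySem.Chars.join, List.intercalate]
  | cons a t ih =>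
    cases t with
    | nil => simp [PySem.Chars.join, List.intercalate]
    | cons b u => rw [pvJoin_cons_cons', ih]; simp

-- B's fold invariant
theorem pvFold_eq (d : List (String × String)) :
    ∀ (l : List Char) (out : List String) (tok : List Char),
    (((l.foldl (pvStep d) (out, tok)).1
        ++ [pvLookupD d (String.ofList (l.foldl (pvStep d) (out, tok)).2)]).map String.toList).flatten
      = (out.map String.toList).flatten ++ pvH d tok l := by
  intro l
  induction l with
  | nil => intro out tok; simp [pvH, pvF]
  | cons c l ih =>
    intro out tok
    by_cases hc : c = '.' ∨ c = '>'
    · have hb : (c = '.' || c = '>') = true := by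
        rcases hc with h | h <;> simp [h]
      simp only [List.foldl_cons]
      rw [show pvStep d (out, tok) c
          = (out ++ [pvLookupD d (String.ofList tok), String.ofList [c]], []) by
        simp [pvStep, hb]]
      rw [ih]
      simp only [pvH, if_pos hc]
      simp [pvF, List.append_assoc]
    · have hb : (c = '.' || c = '>') = false := by
        push Not at hc; simp [hc.1, hc.2]
      simp only [List.foldl_cons]
      rw [show pvStep d (out, tok) c = (out, tok ++ [c]) by simp [pvStep, hb]]
      rw [ih]
      simp [pvH, if_neg hc]

theorem portB_toList (s : String) (d : List (String × String)) :
    (replace_with_smiles_alt s d).toList = pvH d [] s.toList := by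
  have hdef : replace_with_smiles_alt s d
      = PySem.Str.join "" ((s.toList.foldl (pvStep d) ([], [])).1
          ++ [pvLookupD d (String.ofList (s.toList.foldl (pvStep d) ([], [])).2)]) := rfl
  rw [hdef, PySem.Str.toList_join]
  rw [show ("".toList) = ([] : List Char) from rfl]
  rw [pvJoin_empty]
  simpa using pvFold_eq d s.toList [] []

-- ===== VERDICT (by name: the statement is the Claim_ definition above) =====
theorem replace_with_smiles_spec : Claim_equal_replace_with_smiles := by
  intro s d _
  unfold Spec_replace_with_smiles
  apply String.toList_inj.mp
  rw [portA_toList, portB_toList]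
  simpa using pvA_eq_pvH d s.toList [] (by simp) (by simp)
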